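-- pv_equiv track=rewrite | github.com/eerstone/Myflight | delay_prediction/views.py | parse2
-- ===== SOURCE A (Python) =====
-- def isdigit(c):
--     return c >= '0' and c <= '9'
--
-- def parse2(s, pos):
--     n = len(s)
--     i = 0
--     num = []
--     while i < n:
--         if isdigit(s[i]):
--             cur = 0
--             while i < n and isdigit(s[i]):
--                 cur = cur * 10 + int(s[i]) - int('0')
--                 i += 1
--             num.append(cur)
--         i += 1
--     if len(num) == 0:
--         return 50
--     return num[pos]
-- ===== SOURCE B (Python) =====
-- def parse2(s, pos):
--     masked = ''.join(c if '0' <= c <= '9' else ' ' for c in s)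
--     nums = [int(tok) for tok in masked.split()]
--     if not nums:
--         return 50
--     return nums[pos]
-- ===== Notes on version B (the rewrite author's own statement) =====
-- stated objective: idiomatic
-- what changed: Replaces A's hand-rolled nested character scan with manual cur*10+digit accumulation by masking every non-digit character to a space, splitting the masked string on whitespace, and applying int() to each token.
import Mathlib
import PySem

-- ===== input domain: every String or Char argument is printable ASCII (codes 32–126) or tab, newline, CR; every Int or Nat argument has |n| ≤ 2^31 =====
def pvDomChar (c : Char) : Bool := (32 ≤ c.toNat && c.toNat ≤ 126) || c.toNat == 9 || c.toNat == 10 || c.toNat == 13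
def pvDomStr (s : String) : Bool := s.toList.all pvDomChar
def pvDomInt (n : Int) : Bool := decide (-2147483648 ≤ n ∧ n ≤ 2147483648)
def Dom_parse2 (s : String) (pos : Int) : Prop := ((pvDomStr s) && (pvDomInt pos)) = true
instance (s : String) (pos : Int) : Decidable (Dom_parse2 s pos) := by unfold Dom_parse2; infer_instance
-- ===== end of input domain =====

-- B replaces A's hand-rolled nested character scan and manual cur*10+digit accumulation by
-- mask-non-digits-to-space + whitespace split() + int() per token (objective: idiomatic).
-- Neither version mutates its arguments; the equivalence is about the return value.

-- ===== PORT A =====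
-- helper isdigit(c) from A's module
def isdigitC (c : Char) : Bool := '0' ≤ c && c ≤ '9'

-- the inner while loop: consumes leading digits, accumulating cur = cur*10 + int(s[i]) - int('0');
-- int(s[i]) - int('0') is ported as c.toNat - 48, exact for the ASCII digits the isdigit guard admits
def innerA : List Char → Int → Int × List Char
  | [], cur => (cur, [])
  | c :: rest, cur =>
    if isdigitC c then innerA rest (cur * 10 + ((c.toNat : Int) - 48)) else (cur, c :: rest)

-- termination helper for the outer loop (the inner loop never adds characters)
theorem innerA_len (l : List Char) : ∀ cur, ((innerA l cur).2).length ≤ l.length := by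
  induction l with
  | nil => intro cur; simp [innerA]
  | cons c rest ih =>
    intro cur
    simp only [innerA]
    split
    · exact le_trans (ih _) (by simp)
    · simp

-- the outer while loop: on a digit, run the inner loop and append cur, then i += 1 (tail); else i += 1
def outerA : List Char → List Int → List Int
  | [], num => num
  | c :: rest, num =>
    if h : isdigitC c then
      outerA ((innerA (c :: rest) 0).2).tail (num ++ [(innerA (c :: rest) 0).1])
    else outerA rest num
termination_by l _ => l.length
decreasing_by
  · have h1 := innerA_len rest (0 * 10 + ((c.toNat : Int) - 48))
    simp only [innerA, h, if_pos]
    simp only [List.length_cons, List.length_tail]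
    omega
  · simp

def parse2 (s : String) (pos : Int) : Int :=
  let num := outerA s.toList []
  if num.length = 0 then 50
  else (PySem.List.pyGet? num pos).getD 0   -- num[pos]; the IndexError case is excluded by Pre_parse2

-- ===== PORT B =====
-- masked = ''.join(c if '0' <= c <= '9' else ' ' for c in s)
def pvMask (c : Char) : Char := if '0' ≤ c && c ≤ '9' then c else ' '

-- int(tok): exact for the nonempty ASCII-digit tokens masked.split() produces
def pvInt (t : List Char) : Int := t.foldl (fun a c => a * 10 + ((c.toNat : Int) - 48)) 0

def parse2_alt (s : String) (pos : Int) : Int :=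
  let nums := (PySem.Chars.split₀ (s.toList.map pvMask)).map pvInt   -- masked.split() at the List Char level
  if nums = [] then 50
  else (PySem.List.pyGet? nums pos).getD 0   -- nums[pos]; the IndexError case is excluded by Pre_parse2

-- ===== PRECONDITION & SPEC =====
-- number of maximal digit runs of s: count the digit positions whose predecessor (space-padded) is not a digit
def runCount (s : String) : Nat :=
  ((' ' :: s.toList).zip s.toList).countP (fun p => !(isdigitC p.1) && isdigitC p.2)

-- Pre_ excludes exactly the inputs where A raises IndexError: pos outside Python's index range for
-- the nonempty list of extracted numbers (when no number is found both return 50 for any pos).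
def Pre_parse2 (s : String) (pos : Int) : Prop :=
  runCount s = 0 ∨ (-(runCount s : Int) ≤ pos ∧ pos < (runCount s : Int))
instance (s : String) (pos : Int) : Decidable (Pre_parse2 s pos) := by unfold Pre_parse2; infer_instance

def pvWitness_parse2 : String × Int := ("a1b22", 0)

def Spec_parse2 (s : String) (pos : Int) (out : Int) : Prop := out = parse2_alt s pos
instance (s : String) (pos : Int) (out : Int) : Decidable (Spec_parse2 s pos out) := by unfold Spec_parse2; infer_instance

-- ===== CLAIM (what is proved, stated in full; the proofs are below) =====
def Claim_equal_parse2 : Prop := ∀ (s : String) (pos : Int), Dom_parse2 s pos → Pre_parse2 s pos → Spec_parse2 s pos (parse2 s pos)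

-- ===== LEMMAS AND PROOFS =====

-- the maximal digit runs of a character list: both ports compute (map pvInt) of this
def runsL : List Char → List (List Char)
  | [] => []
  | c :: t =>
    if isdigitC c then (c :: t.takeWhile isdigitC) :: runsL (t.dropWhile isdigitC) else runsL t
termination_by l => l.length
decreasing_by
  · have := (List.dropWhile_sublist (l := t) (p := isdigitC)).length_le
    simp only [List.length_cons]; omega
  · simp

-- the nonspace runs split₀ computes, in structural form
def tokL : List Char → List (List Char)
  | [] => []
  | c :: t =>
    if PySem.Chars.isspace c then tokL t
    else (c :: t.takeWhile (fun x => !PySem.Chars.isspace x)) ::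
         tokL (t.dropWhile (fun x => !PySem.Chars.isspace x))
termination_by l => l.length
decreasing_by
  · simp
  · have := (List.dropWhile_sublist (l := t) (p := fun x => !PySem.Chars.isspace x)).length_le
    simp only [List.length_cons]; omega

theorem digit_bounds {c : Char} (h : isdigitC c = true) : 48 ≤ c.toNat ∧ c.toNat ≤ 57 := by
  simp only [isdigitC, Bool.and_eq_true, decide_eq_true_eq, Char.le_def, UInt32.le_iff_toNat_le] at h
  exact ⟨h.1, h.2⟩

theorem digit_not_space {c : Char} (h : isdigitC c = true) : PySem.Chars.isspace c = false := by
  have hb := digit_bounds h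
  simp only [PySem.Chars.isspace]
  simp only [Bool.or_eq_false_iff, Bool.and_eq_false_iff, decide_eq_false_iff_not]
  omega

theorem mask_nonspace (c : Char) : (!PySem.Chars.isspace (pvMask c)) = isdigitC c := by
  by_cases h : isdigitC c = true
  · have hns := digit_not_space h
    have hc : pvMask c = c := by simp only [isdigitC] at h; simp [pvMask, h]
    rw [hc, hns, h]; rfl
  · have hc : pvMask c = ' ' := by simp only [isdigitC] at h; simp [pvMask, h]
    rw [hc]
    simp only [Bool.not_eq_true] at h
    rw [h]
    decide

-- split₀.go fully characterised by tokL
theorem go_spec : ∀ (l cur acc : List _),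
    PySem.Chars.split₀.go l cur acc =
      acc.reverse ++
        (if cur = [] then tokL l
         else (cur.reverse ++ l.takeWhile (fun x => !PySem.Chars.isspace x)) ::
              tokL (l.dropWhile (fun x => !PySem.Chars.isspace x))) := by
  intro l
  induction l with
  | nil =>
    intro cur acc
    by_cases hc : cur = [] <;> simp [PySem.Chars.split₀.go, hc, tokL]
  | cons c rest ih =>
    intro cur acc
    by_cases hs : PySem.Chars.isspace c
    · by_cases hc : cur = []
      · simp [PySem.Chars.split₀.go, hs, hc, ih, tokL]
      · simp [PySem.Chars.split₀.go, hs, hc, ih, tokL]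
    · by_cases hc : cur = []
      · simp [PySem.Chars.split₀.go, hs, hc, ih, tokL]
      · simp [PySem.Chars.split₀.go, hs, hc, ih]

theorem split₀_eq_tokL (l : List Char) : PySem.Chars.split₀ l = tokL l := by
  simp [PySem.Chars.split₀, go_spec]

theorem mask_take (t : List Char) :
    (t.map pvMask).takeWhile (fun x => !PySem.Chars.isspace x) = t.takeWhile isdigitC := by
  induction t with
  | nil => rfl
  | cons c t ih =>
    simp only [List.map_cons, List.takeWhile_cons, mask_nonspace]
    by_cases h : isdigitC c = true
    · have hc : pvMask c = c := by simp only [isdigitC] at h; simp [pvMask, h]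
      simp [h, hc, ih]
    · simp only [Bool.not_eq_true] at h; simp [h]

theorem mask_drop (t : List Char) :
    (t.map pvMask).dropWhile (fun x => !PySem.Chars.isspace x) = (t.dropWhile isdigitC).map pvMask := by
  induction t with
  | nil => rfl
  | cons c t ih =>
    simp only [List.map_cons, List.dropWhile_cons, mask_nonspace]
    by_cases h : isdigitC c = true
    · simp [h, ih]
    · simp only [Bool.not_eq_true] at h; simp [h]

theorem tokL_mask (l : List Char) : tokL (l.map pvMask) = runsL l := by
  induction l using runsL.induct with
  | case1 => rw [List.map_nil, tokL, runsL]
  | case2 c t h ih =>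
    have hc : pvMask c = c := by simp only [isdigitC] at h; simp [pvMask, h]
    rw [runsL, if_pos h, List.map_cons, tokL, hc]
    rw [if_neg (by simp [digit_not_space h])]
    rw [mask_take, mask_drop, ih]
  | case3 c t h ih =>
    have hc : pvMask c = ' ' := by simp only [isdigitC] at h; simp [pvMask, h]
    rw [runsL, if_neg h, List.map_cons, tokL, hc]
    rw [if_pos (by decide), ih]

theorem innerA_spec (l : List Char) : ∀ cur,
    innerA l cur = ((l.takeWhile isdigitC).foldl (fun a c => a * 10 + ((c.toNat : Int) - 48)) cur,
                    l.dropWhile isdigitC) := by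
  induction l with
  | nil => intro cur; simp [innerA]
  | cons c rest ih =>
    intro cur
    by_cases h : isdigitC c = true <;> simp [innerA, h, ih]

theorem head_dropWhile_nondigit (t : List Char) :
    ∀ c ∈ (t.dropWhile isdigitC).head?, isdigitC c = false := by
  induction t with
  | nil => simp
  | cons c t ih =>
    by_cases h : isdigitC c = true
    · simpa [List.dropWhile_cons, h] using ih
    · simp [h]

theorem runsL_tail_of_head_nondigit (l : List Char) (h : ∀ c ∈ l.head?, isdigitC c = false) :
    runsL l = runsL l.tail := by
  cases l with
  | nil => rfl
  | cons c t =>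
    have hc : isdigitC c = false := h c (by simp)
    rw [runsL, if_neg (by simp [hc]), List.tail_cons]

theorem outerA_spec (l : List Char) (num : List Int) :
    outerA l num = num ++ (runsL l).map pvInt := by
  induction l, num using outerA.induct with
  | case1 num => rw [outerA, runsL]; simp
  | case2 c rest num h ih =>
    rw [outerA, dif_pos h, ih, innerA_spec, runsL, if_pos h]
    rw [List.takeWhile_cons_of_pos h, List.dropWhile_cons_of_pos h]
    rw [← runsL_tail_of_head_nondigit _ (head_dropWhile_nondigit rest)]
    simp [pvInt]
  | case3 c rest num h ih =>
    rw [outerA, dif_neg h, ih, runsL, if_neg h]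

-- ===== VERDICT (by name: the statement is the Claim_ definition above) =====
theorem parse2_spec : Claim_equal_parse2 := by
  intro s pos _ _
  unfold Spec_parse2 parse2 parse2_alt
  have hB : (PySem.Chars.split₀ (s.toList.map pvMask)).map pvInt = (runsL s.toList).map pvInt := by
    rw [split₀_eq_tokL, tokL_mask]
  have hA : outerA s.toList [] = (runsL s.toList).map pvInt := by
    simpa using outerA_spec s.toList []
  rw [hA, hB]
  rcases h : (runsL s.toList).map pvInt with _ | _ <;> simp
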